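-- pv_equiv track=rewrite | github.com/kolashankar/nexus-main | backend/api/v1/market/router.py | _calculate_wealth_score
-- ===== SOURCE A (Python) =====
-- from typing import Dict, Any
--
-- def _calculate_wealth_score(currencies: Dict[str, int]) -> int:
--     """Calculate overall wealth score."""
--     weights = {
--         "credits": 1,
--         "karma_tokens": 10,
--         "dark_matter": 10,
--         "prestige_points": 50,
--         "guild_coins": 5,
--         "legacy_shards": 100
--     }
--
--     score = 0
--     for currency, balance in currencies.items():
--         weight = weights.get(currency, 1)
--         score += balance * weight
--
--     return score
-- ===== SOURCE B (Python) =====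
-- def _calculate_wealth_score(currencies):
--     """Calculate overall wealth score: uniform base sum, then sparse bonus corrections."""
--     total = sum(currencies.values())
--     bonus_weights = (
--         ("karma_tokens", 10),
--         ("dark_matter", 10),
--         ("prestige_points", 50),
--         ("guild_coins", 5),
--         ("legacy_shards", 100),
--     )
--     for name, weight in bonus_weights:
--         if name in currencies:
--             total += currencies[name] * (weight - 1)
--     return total
-- ===== Notes on version B (the rewrite author's own statement) =====
-- stated objective: alternative
-- what changed: Replaces the multiply-per-entry weighted loop with one uniform base pass (a single sum of all balances) plus a sparse correction pass over the fixed bonus-weight table, adding balance*(weight-1) for each special currency present; the per-entry dict lookup and multiply disappear from the main pass. Pre_ excludes association lists with duplicate keys, which do not encode any Python dict.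
import Mathlib
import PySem

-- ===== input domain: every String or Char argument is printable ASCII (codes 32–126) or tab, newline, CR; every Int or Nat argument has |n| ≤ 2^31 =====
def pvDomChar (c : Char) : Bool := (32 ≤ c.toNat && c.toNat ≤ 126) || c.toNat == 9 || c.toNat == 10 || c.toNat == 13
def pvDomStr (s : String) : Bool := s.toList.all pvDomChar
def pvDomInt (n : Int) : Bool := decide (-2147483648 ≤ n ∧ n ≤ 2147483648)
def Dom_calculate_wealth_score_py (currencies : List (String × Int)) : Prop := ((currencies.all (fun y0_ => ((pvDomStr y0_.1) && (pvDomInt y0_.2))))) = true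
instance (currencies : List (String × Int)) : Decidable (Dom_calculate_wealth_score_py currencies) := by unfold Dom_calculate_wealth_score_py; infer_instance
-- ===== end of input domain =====

-- B replaces A's multiply-per-entry weighted loop by a uniform base sum of all balances plus a
-- sparse correction pass over the fixed bonus-weight table (alternative decomposition, same cost).

-- ===== PORT A =====
def pvWeights : PySem.Dict String Int :=
  PySem.Dict.ofList [("credits", 1), ("karma_tokens", 10), ("dark_matter", 10),
                     ("prestige_points", 50), ("guild_coins", 5), ("legacy_shards", 100)]

def calculate_wealth_score_py (currencies : List (String × Int)) : Int :=
  currencies.foldl (fun score cb => score + cb.2 * pvWeights.getD cb.1 1) 0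

-- ===== PORT B =====
def pvBonusWeights : List (String × Int) :=
  [("karma_tokens", 10), ("dark_matter", 10), ("prestige_points", 50),
   ("guild_coins", 5), ("legacy_shards", 100)]

def calculate_wealth_score_py_alt (currencies : List (String × Int)) : Int :=
  let d := PySem.Dict.mk currencies
  let total := currencies.foldl (fun s p => s + p.2) 0
  pvBonusWeights.foldl
    (fun t nw => if d.contains nw.1 then t + d.getD nw.1 0 * (nw.2 - 1) else t) total

-- ===== PRECONDITION & SPEC =====
-- Pre_ excludes association lists with duplicate keys: they do not encode any Python dict
-- (a dict's keys are unique), so A's behaviour on them is an artefact of the list encoding.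
def pvNodupKeys : List (String × Int) → Bool
  | [] => true
  | (k, _) :: rest => !(rest.any (fun p => p.1 == k)) && pvNodupKeys rest

def Pre_calculate_wealth_score_py (currencies : List (String × Int)) : Prop :=
  pvNodupKeys currencies = true
instance (currencies : List (String × Int)) : Decidable (Pre_calculate_wealth_score_py currencies) := by
  unfold Pre_calculate_wealth_score_py; infer_instance

def pvWitness_calculate_wealth_score_py : (List (String × Int)) :=
  [("credits", 3), ("karma_tokens", 2), ("gold", -1)]

def Spec_calculate_wealth_score_py (currencies : List (String × Int)) (out : Int) : Prop := out = calculate_wealth_score_py_alt currencies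
instance (currencies : List (String × Int)) (out : Int) : Decidable (Spec_calculate_wealth_score_py currencies out) := by unfold Spec_calculate_wealth_score_py; infer_instance

-- ===== CLAIM (what is proved, stated in full; the proofs are below) =====
def Claim_equal_calculate_wealth_score_py : Prop := ∀ (currencies : List (String × Int)), Dom_calculate_wealth_score_py currencies → Pre_calculate_wealth_score_py currencies → Spec_calculate_wealth_score_py currencies (calculate_wealth_score_py currencies)

-- ===== LEMMAS AND PROOFS =====
def pvT (l : List (String × Int)) (n : String) (c : Int) : Int :=
  if (PySem.Dict.mk l).contains n then (PySem.Dict.mk l).getD n 0 * c else 0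

theorem pv_if_add (c : Prop) [Decidable c] (t x : Int) :
    (if c then t + x else t) = t + (if c then x else 0) := by split_ifs <;> simp

theorem pvB_eq (l : List (String × Int)) :
    calculate_wealth_score_py_alt l =
      l.foldl (fun s p => s + p.2) 0 + pvT l "karma_tokens" 9 + pvT l "dark_matter" 9 +
      pvT l "prestige_points" 49 + pvT l "guild_coins" 4 + pvT l "legacy_shards" 99 := by
  simp only [calculate_wealth_score_py_alt, pvBonusWeights, List.foldl_cons, List.foldl_nil,
    pv_if_add, pvT]
  norm_num

theorem pv_getD_cons (k : String) (v : Int) (l : List (String × Int)) (n : String) :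
    (PySem.Dict.mk ((k,v)::l)).getD n 0 = if k = n then v else (PySem.Dict.mk l).getD n 0 := by
  simp [PySem.Dict.getD_eq_get?_getD, PySem.Dict.get?_mk_cons]
  split_ifs <;> simp_all

theorem pv_contains_cons (k : String) (v : Int) (l : List (String × Int)) (n : String) :
    (PySem.Dict.mk ((k,v)::l)).contains n = (decide (k = n) || (PySem.Dict.mk l).contains n) := by
  rw [PySem.Dict.contains_eq_isSome_get?, PySem.Dict.contains_eq_isSome_get?, PySem.Dict.get?_mk_cons]
  split_ifs <;> simp_all

theorem pv_contains_not_mem (l : List (String × Int)) (k : String)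
    (h : k ∉ l.map Prod.fst) : (PySem.Dict.mk l).contains k = false := by
  have h2 : (PySem.Dict.mk l).get? k = none := by
    rw [PySem.Dict.get?_eq_none_iff_not_mem_keys]
    simpa using h
  rw [PySem.Dict.contains_eq_isSome_get?, h2]
  rfl

theorem pv_term_cons (n : String) (c : Int) (k : String) (v : Int) (l : List (String × Int))
    (hk : k ∉ l.map Prod.fst) :
    pvT ((k,v)::l) n c = (if k = n then v * c else 0) + pvT l n c := by
  unfold pvT
  rw [pv_contains_cons, pv_getD_cons]
  by_cases h : k = n
  · subst h
    rw [pv_contains_not_mem l k hk]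
    simp
  · rw [decide_eq_false h, Bool.false_or]
    simp [h]

theorem pv_bonus (k : String) (v : Int) :
    v * pvWeights.getD k 1 =
      v + (if k = "karma_tokens" then v * 9 else 0) + (if k = "dark_matter" then v * 9 else 0) +
      (if k = "prestige_points" then v * 49 else 0) + (if k = "guild_coins" then v * 4 else 0) +
      (if k = "legacy_shards" then v * 99 else 0) := by
  by_cases h1 : k = "karma_tokens"
  · subst h1; rw [show pvWeights.getD "karma_tokens" 1 = 10 from rfl]; simp; ring
  by_cases h2 : k = "dark_matter"
  · subst h2; rw [show pvWeights.getD "dark_matter" 1 = 10 from rfl]; simp; ring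
  by_cases h3 : k = "prestige_points"
  · subst h3; rw [show pvWeights.getD "prestige_points" 1 = 50 from rfl]; simp; ring
  by_cases h4 : k = "guild_coins"
  · subst h4; rw [show pvWeights.getD "guild_coins" 1 = 5 from rfl]; simp; ring
  by_cases h5 : k = "legacy_shards"
  · subst h5; rw [show pvWeights.getD "legacy_shards" 1 = 100 from rfl]; simp; ring
  by_cases h0 : k = "credits"
  · subst h0; rw [show pvWeights.getD "credits" 1 = 1 from rfl]; simp
  · have hw : pvWeights.getD k 1 = 1 := by
      simp [pvWeights, PySem.Dict.ofList, PySem.Dict.update, PySem.Dict.getD_insert,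
        h0, h1, h2, h3, h4, h5, PySem.Dict.getD_empty]
    rw [hw]; simp [h1, h2, h3, h4, h5]

theorem pv_main (l : List (String × Int)) (h : pvNodupKeys l = true) :
    calculate_wealth_score_py l = calculate_wealth_score_py_alt l := by
  induction l with
  | nil => decide
  | cons p l ih =>
    obtain ⟨k, v⟩ := p
    rw [pvNodupKeys, Bool.and_eq_true, Bool.not_eq_eq_eq_not, Bool.not_true] at h
    obtain ⟨hany, hl⟩ := h
    have hk : k ∉ l.map Prod.fst := by
      simp only [List.any_eq_false, beq_iff_eq] at hany
      simp only [List.mem_map]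
      rintro ⟨p, hp, rfl⟩
      exact hany p hp rfl
    have ihe := ih hl
    rw [pvB_eq] at ihe ⊢
    simp only [calculate_wealth_score_py, PySem.List.foldl_add, List.foldl_cons] at ihe ⊢
    rw [pv_term_cons _ _ _ _ _ hk, pv_term_cons _ _ _ _ _ hk, pv_term_cons _ _ _ _ _ hk,
      pv_term_cons _ _ _ _ _ hk, pv_term_cons _ _ _ _ _ hk]
    have hb := pv_bonus k v
    linarith [hb, ihe]

-- ===== VERDICT (by name: the statement is the Claim_ definition above) =====
theorem calculate_wealth_score_py_spec : Claim_equal_calculate_wealth_score_py := by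
  intro c _ hpre
  exact pv_main c hpre
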